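-- pv_equiv track=rewrite | github.com/dmacintyre/Project-Euler | python/prob_46.py | genValidTwiceASquare
-- ===== SOURCE A (Python) =====
-- def genValidTwiceASquare(n):
--     l = []
--     s = 1
--     while True:
--         l.append(2*(s**2))
--         if l[-1] > n:
--             break
--         s += 1
--     return l
-- ===== SOURCE B (Python) =====
-- def _isqrt(m):
--     # floor square root by integer Newton iteration (m >= 0)
--     if m < 2:
--         return m
--     x = 1 << ((m.bit_length() + 1) // 2)
--     while True:
--         y = (x + m // x) // 2
--         if y >= x:
--             return x
--         x = y
--
--
-- def genValidTwiceASquare(n):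
--     # smallest s with 2*s*s > n, computed in closed form
--     smax = 1 if n < 0 else _isqrt(n // 2) + 1
--     return [2 * s * s for s in range(1, smax + 1)]
-- ===== Notes on version B (the rewrite author's own statement) =====
-- stated objective: alternative
-- what changed: B computes the stopping index smax (the smallest s with 2*s*s > n) in closed form via a hand-rolled integer Newton isqrt instead of testing the last appended element inside an unbounded while-loop, then builds the list with a single comprehension over range(1, smax+1).
import Mathlib
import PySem

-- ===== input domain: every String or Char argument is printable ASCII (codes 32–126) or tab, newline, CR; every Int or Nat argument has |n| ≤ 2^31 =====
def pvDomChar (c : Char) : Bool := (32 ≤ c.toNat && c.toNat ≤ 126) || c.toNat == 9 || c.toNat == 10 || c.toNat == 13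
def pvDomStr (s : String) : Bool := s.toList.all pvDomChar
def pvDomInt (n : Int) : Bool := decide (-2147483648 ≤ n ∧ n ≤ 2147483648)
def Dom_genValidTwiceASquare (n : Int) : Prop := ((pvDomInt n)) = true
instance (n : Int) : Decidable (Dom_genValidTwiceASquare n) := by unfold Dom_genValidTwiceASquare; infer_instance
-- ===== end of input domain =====

-- B replaces A's unbounded append-until-exceed loop by a closed-form stopping index
-- (smallest s with 2*s*s > n, via an integer-Newton isqrt) and one comprehension; objective: alternative.

-- ===== PORT A =====
-- the while-True loop: append 2*s**2, break once the last element exceeds n, else s += 1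
-- (s starts at 1 and only increases, so it is carried as a Nat)
def loopA (n : Int) (s : Nat) : List Int :=
  let v : Int := 2 * (s : Int) ^ 2
  if v > n then [v] else v :: loopA n (s + 1)
termination_by (n + 1 - 2 * (s : Int) ^ 2).toNat
decreasing_by
  rename_i h
  simp only [not_lt] at h
  have h1 : 2 * ((s : Int) + 1) ^ 2 = 2 * (s : Int) ^ 2 + 4 * (s : Int) + 2 := by ring
  push_cast
  omega

def genValidTwiceASquare (n : Int) : List Int := loopA n 1

-- ===== PORT B =====
-- _isqrt's Newton loop; Python's ints here are nonnegative throughout, so the port is over Nat,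
-- where Python's '//' is exactly Nat division
def isqrtAux (m x : Nat) : Nat :=
  let y := (x + m / x) / 2
  if y < x then isqrtAux m y else x
termination_by x

-- Python _isqrt(m); m.bit_length() is PySem.Int.bitLength, 1 << k is 2 ^ k
def pyIsqrt (m : Nat) : Nat :=
  if m < 2 then m
  else isqrtAux m (2 ^ ((PySem.Int.bitLength (m : Int) + 1) / 2))

def genValidTwiceASquare_alt (n : Int) : List Int :=
  let smax : Int := if n < 0 then 1 else (pyIsqrt (PySem.Int.floordiv n 2).toNat : Int) + 1
  (PySem.List.pyRange 1 (smax + 1) 1).map (fun s => 2 * s * s)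

-- ===== PRECONDITION & SPEC =====
def Spec_genValidTwiceASquare (n : Int) (out : List Int) : Prop := out = genValidTwiceASquare_alt n
instance (n : Int) (out : List Int) : Decidable (Spec_genValidTwiceASquare n out) := by unfold Spec_genValidTwiceASquare; infer_instance

-- ===== CLAIM (what is proved, stated in full; the proofs are below) =====
def Claim_equal_genValidTwiceASquare : Prop := ∀ (n : Int), Dom_genValidTwiceASquare n → Spec_genValidTwiceASquare n (genValidTwiceASquare n)

-- ===== LEMMAS AND PROOFS =====

-- integer AM–GM: one Newton step from any positive x stays at or above the true floor sqrt
lemma newton_ge_sqrt (m x : Nat) (hx : 1 ≤ x) : Nat.sqrt m ≤ (x + m / x) / 2 := by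
  set s := Nat.sqrt m with hs
  have hle : s * 2 ≤ x + m / x := by
    by_cases h : 2 * s ≤ x
    · calc s * 2 ≤ x := by omega
      _ ≤ x + m / x := Nat.le_add_right _ _
    · have hxs : x < 2 * s := by omega
      have hss : s * s ≤ m := by
        have := Nat.sqrt_le' m
        rwa [← hs, pow_two] at this
      have hdiv : 2 * s - x ≤ m / x := by
        rw [Nat.le_div_iff_mul_le hx]
        have hmid : (2 * s - x) * x ≤ s * s := by
          zify [le_of_lt hxs]
          nlinarith [sq_nonneg ((s : Int) - (x : Int))]
        exact le_trans hmid hss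
      generalize m / x = c at hdiv ⊢
      omega
  exact (Nat.le_div_iff_mul_le (by omega)).mpr hle

lemma isqrtAux_eq (m : Nat) : ∀ x, Nat.sqrt m ≤ x → isqrtAux m x = Nat.sqrt m := by
  intro x
  induction x using Nat.strong_induction_on with
  | _ x ih =>
    intro hx
    rw [isqrtAux]
    split
    · rename_i hlt
      have hx1 : 1 ≤ x := by
        rcases Nat.eq_zero_or_pos x with h0 | h1
        · subst h0; simp at hlt
        · exact h1
      exact ih _ hlt (newton_ge_sqrt m x hx1)
    · rename_i hge
      -- y ≥ x  ⇒  x ≤ m / x  ⇒  x * x ≤ m  ⇒  x ≤ sqrt m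
      have hge' : x ≤ (x + m / x) / 2 := by omega
      have h2 : x * 2 ≤ x + m / x := (Nat.le_div_iff_mul_le (by omega)).mp hge'
      have hxd : x ≤ m / x := by generalize m / x = c at h2 ⊢; omega
      have hxx : x * x ≤ m := by
        calc x * x ≤ (m / x) * x := Nat.mul_le_mul_right x hxd
        _ ≤ m := Nat.div_mul_le_self m x
      exact le_antisymm (Nat.le_sqrt'.mpr (by rwa [pow_two])) hx

lemma pyIsqrt_eq (m : Nat) : pyIsqrt m = Nat.sqrt m := by
  rw [pyIsqrt]
  split
  · rename_i h
    interval_cases m <;> decide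
  · rename_i h
    apply isqrtAux_eq
    -- the initial guess squared exceeds m
    set k := (PySem.Int.bitLength (m : Int) + 1) / 2 with hk
    have hbl : m < 2 ^ PySem.Int.bitLength (m : Int) := by
      have := PySem.Int.lt_two_pow_bitLength (m : Int)
      simpa using this
    have h2k : PySem.Int.bitLength (m : Int) ≤ 2 * k := by omega
    have hlt : m < (2 ^ k) ^ 2 := by
      calc m < 2 ^ PySem.Int.bitLength (m : Int) := hbl
      _ ≤ 2 ^ (2 * k) := Nat.pow_le_pow_right (by norm_num) h2k
      _ = (2 ^ k) ^ 2 := by rw [← pow_mul, Nat.mul_comm]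
    exact le_of_lt (Nat.sqrt_lt'.mpr hlt)

-- the loop from counter s, given the least index k at which 2*k^2 exceeds n, is the mapped range [s..k]
lemma loopA_eq (n : Int) (k : Nat)
    (hk : 2 * (k : Int) ^ 2 > n)
    (hmin : ∀ t : Nat, 1 ≤ t → t < k → 2 * (t : Int) ^ 2 ≤ n) :
    ∀ (d s : Nat), k = s + d → 1 ≤ s →
      loopA n s = (PySem.List.pyRange (s : Int) ((k : Int) + 1) 1).map (fun t => 2 * t * t) := by
  intro d
  induction d with
  | zero =>
    intro s hks hs1
    have hsk : s = k := by omega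
    subst hsk
    rw [loopA, if_pos hk, PySem.List.pyRange_one_singleton, List.map_cons, List.map_nil]
    congr 1
    ring
  | succ d ih =>
    intro s hks hs1
    have hsk : s < k := by omega
    have hle : 2 * (s : Int) ^ 2 ≤ n := hmin s hs1 hsk
    rw [loopA, if_neg (by omega)]
    have hcons : PySem.List.pyRange (s : Int) ((k : Int) + 1) 1
        = (s : Int) :: PySem.List.pyRange ((s : Int) + 1) ((k : Int) + 1) 1 :=
      PySem.List.pyRange_one_cons (by exact_mod_cast (by omega : (s : Int) < (k : Int) + 1))
    rw [hcons, List.map_cons, ih (s + 1) (by omega) (by omega)]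
    have hc : ((s + 1 : Nat) : Int) = (s : Int) + 1 := by push_cast; ring
    rw [hc]
    congr 1
    ring

-- ===== VERDICT (by name: the statement is the Claim_ definition above) =====
theorem genValidTwiceASquare_spec : Claim_equal_genValidTwiceASquare := by
  intro n _
  unfold Spec_genValidTwiceASquare genValidTwiceASquare genValidTwiceASquare_alt
  by_cases hn : n < 0
  · rw [if_pos hn]
    have h := loopA_eq n 1 (by norm_num; omega) (by intro t h1 h2; omega) 0 1 rfl le_rfl
    simpa using h
  · rw [if_neg hn]
    rw [not_lt] at hn
    set q : Nat := (PySem.Int.floordiv n 2).toNat with hq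
    have hfd : PySem.Int.floordiv n 2 = n / 2 := PySem.Int.floordiv_eq_ediv_of_pos (by norm_num)
    have hqn : 2 * (q : Int) ≤ n ∧ n ≤ 2 * (q : Int) + 1 := by
      rw [hq, hfd]
      omega
    set k : Nat := Nat.sqrt q + 1 with hkdef
    have hpy : pyIsqrt q = Nat.sqrt q := pyIsqrt_eq q
    have hk : 2 * (k : Int) ^ 2 > n := by
      have h1 : q < (Nat.sqrt q + 1) ^ 2 := Nat.lt_succ_sqrt' q
      have h2 : (q : Int) < (k : Int) ^ 2 := by rw [hkdef]; exact_mod_cast h1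
      nlinarith [hqn.1, hqn.2]
    have hmin : ∀ t : Nat, 1 ≤ t → t < k → 2 * (t : Int) ^ 2 ≤ n := by
      intro t h1 h2
      have ht : t ≤ Nat.sqrt q := by omega
      have htt : t ^ 2 ≤ q := Nat.le_sqrt'.mp ht
      have hti : ((t : Int)) ^ 2 ≤ (q : Int) := by exact_mod_cast htt
      nlinarith [hqn.1]
    have h := loopA_eq n k hk hmin (k - 1) 1 (by omega) le_rfl
    show loopA n 1 = List.map (fun s => 2 * s * s) (PySem.List.pyRange 1 (((pyIsqrt q : Int) + 1) + 1) 1)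
    rw [hpy, h, hkdef]
    push_cast
    rfl
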